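-- pv_equiv track=rewrite | github.com/daizhibin88/pythonTeach | src/ccc/j2021/j4.py | solution
-- ===== SOURCE A (Python) =====
-- def solution(booklist:str)->int:
--     ltimes = 0
--     mtimes = 0
--     stimes = 0
--
--     for c in booklist :
--         if c =="L":
--             ltimes=ltimes+1
--         elif c =="M":
--             mtimes= mtimes +1
--         else:
--             stimes = stimes +1
--
--     mltimes = 0
--     sltimes = 0
--     for c in booklist[0:ltimes]:
--         if c =='M':
--             mltimes = mltimes +1
--         elif c=='S':
--             sltimes = sltimes +1
--
--     lmtimes = 0
--     smtimes = 0
--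
--     for c  in booklist[ltimes: ltimes+mtimes]:
--         if c =='L':
--             lmtimes = lmtimes +1
--         elif c =='S':
--             smtimes = smtimes +1
--
--     lstimes = 0
--     mstimes = 0
--
--     for c  in booklist[ltimes+mtimes:]:
--         if c =='L':
--             lstimes = lstimes +1
--         elif c =='M':
--             mstimes = mstimes +1
--
--     count = 0
--     count =count + min ( mltimes , lmtimes )
--     difflm = abs (mltimes -lmtimes)
--     count = count + min (sltimes , lstimes)
--     diffsl  = abs (sltimes - lstimes)
--     count = count + min (smtimes , mstimes)
--     diffsm = abs (smtimes - mstimes)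
--
--     count = count + 2 * diffsl
--     return count
-- ===== SOURCE B (Python) =====
-- def solution(booklist: str) -> int:
--     # Index the string once: sorted position lists of the exact letters L/M/S.
--     pos = {"L": [], "M": [], "S": []}
--     for i, c in enumerate(booklist):
--         if c in pos:
--             pos[c].append(i)
--     b1 = len(pos["L"])              # end of the L region
--     b2 = b1 + len(pos["M"])         # end of the M region
--
--     def below(a, x):
--         # bisect_left on the sorted list a: number of entries < x
--         lo, hi = 0, len(a)
--         while lo < hi:
--             mid = (lo + hi) // 2
--             if a[mid] < x:
--                 lo = mid + 1
--             else:
--                 hi = mid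
--         return lo
--
--     ml = below(pos["M"], b1)                        # M's sitting in the L region
--     sl = below(pos["S"], b1)                        # S's in the L region
--     lm = below(pos["L"], b2) - below(pos["L"], b1)  # L's in the M region
--     sm = below(pos["S"], b2) - sl                   # S's in the M region
--     ls = len(pos["L"]) - below(pos["L"], b2)        # L's in the S region
--     ms = len(pos["M"]) - below(pos["M"], b2)        # M's in the S region
--     return min(ml, lm) + min(sl, ls) + min(sm, ms) + 2 * abs(sl - ls)
-- ===== Notes on version B (the rewrite author's own statement) =====
-- stated objective: alternative
-- what changed: Instead of A's four counting loops over three string slices, B builds sorted position lists for the letters L/M/S in one pass and answers each region-mismatch count with a hand-rolled binary search (bisect_left) over those lists, combining them with the same swap formula.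
import Mathlib
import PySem

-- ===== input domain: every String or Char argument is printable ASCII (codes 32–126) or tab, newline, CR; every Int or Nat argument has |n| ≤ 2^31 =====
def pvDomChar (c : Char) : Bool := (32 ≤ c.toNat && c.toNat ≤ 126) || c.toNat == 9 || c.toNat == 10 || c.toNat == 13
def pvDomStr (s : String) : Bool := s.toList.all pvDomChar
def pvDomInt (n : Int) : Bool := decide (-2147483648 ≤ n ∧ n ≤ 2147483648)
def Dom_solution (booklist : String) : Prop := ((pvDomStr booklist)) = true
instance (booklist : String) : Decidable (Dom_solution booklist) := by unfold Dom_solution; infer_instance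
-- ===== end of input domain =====

-- B replaces A's four counting loops over three slices by a one-pass position index (sorted
-- position lists per letter) queried by hand-rolled binary search (objective: alternative).

-- ===== PORT A =====
-- four loops: total counts, then one counting loop per slice, then the arithmetic
def solution (booklist : String) : Int :=
  let l := booklist.toList
  let t3 := l.foldl (fun (s : Int × Int × Int) c =>
      if c = 'L' then (s.1 + 1, s.2.1, s.2.2)
      else if c = 'M' then (s.1, s.2.1 + 1, s.2.2)
      else (s.1, s.2.1, s.2.2 + 1)) (0, 0, 0)
  let ltimes := t3.1
  let mtimes := t3.2.1
  let p1 := (PySem.List.slice l (some 0) (some ltimes)).foldl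
      (fun (s : Int × Int) c =>
        if c = 'M' then (s.1 + 1, s.2) else if c = 'S' then (s.1, s.2 + 1) else s) (0, 0)
  let mltimes := p1.1
  let sltimes := p1.2
  let p2 := (PySem.List.slice l (some ltimes) (some (ltimes + mtimes))).foldl
      (fun (s : Int × Int) c =>
        if c = 'L' then (s.1 + 1, s.2) else if c = 'S' then (s.1, s.2 + 1) else s) (0, 0)
  let lmtimes := p2.1
  let smtimes := p2.2
  let p3 := (PySem.List.slice l (some (ltimes + mtimes)) none).foldl
      (fun (s : Int × Int) c =>
        if c = 'L' then (s.1 + 1, s.2) else if c = 'M' then (s.1, s.2 + 1) else s) (0, 0)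
  let lstimes := p3.1
  let mstimes := p3.2
  let count : Int := 0
  let count := count + min mltimes lmtimes
  let count := count + min sltimes lstimes
  let diffsl := |sltimes - lstimes|
  let count := count + min smtimes mstimes
  let count := count + 2 * diffsl
  count

-- ===== PORT B =====
-- the `for i, c in enumerate(...)` loop of Source B building pos["L"], pos["M"], pos["S"]
def posLoop : Nat → List Char → List Int × List Int × List Int
  | _, [] => ([], [], [])
  | i, c :: rest =>
    let t := posLoop (i + 1) rest
    if c = 'L' then ((i : Int) :: t.1, t.2.1, t.2.2)
    else if c = 'M' then (t.1, (i : Int) :: t.2.1, t.2.2)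
    else if c = 'S' then (t.1, t.2.1, (i : Int) :: t.2.2)
    else t

-- Source B's hand-written `below` binary-search loop (lo/hi while-loop)
def belowAux (a : List Int) (x : Int) (lo hi : Nat) : Nat :=
  if _h : lo < hi then
    let mid := (lo + hi) / 2
    if a.getD mid 0 < x then belowAux a x (mid + 1) hi
    else belowAux a x lo mid
  else lo
termination_by hi - lo
decreasing_by all_goals omega

def below (a : List Int) (x : Int) : Int := (belowAux a x 0 a.length : Int)

def solution_alt (booklist : String) : Int :=
  let l := booklist.toList
  let p := posLoop 0 l
  let b1 : Int := (p.1.length : Int)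
  let b2 : Int := b1 + (p.2.1.length : Int)
  let ml := below p.2.1 b1
  let sl := below p.2.2 b1
  let lm := below p.1 b2 - below p.1 b1
  let sm := below p.2.2 b2 - sl
  let ls := (p.1.length : Int) - below p.1 b2
  let ms := (p.2.1.length : Int) - below p.2.1 b2
  min ml lm + min sl ls + min sm ms + 2 * |sl - ls|

-- ===== PRECONDITION & SPEC =====
def Spec_solution (booklist : String) (out : Int) : Prop := out = solution_alt booklist
instance (booklist : String) (out : Int) : Decidable (Spec_solution booklist out) := by unfold Spec_solution; infer_instance

-- ===== CLAIM (what is proved, stated in full; the proofs are below) =====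
def Claim_equal_solution : Prop := ∀ (booklist : String), Dom_solution booklist → Spec_solution booklist (solution booklist)

-- ===== LEMMAS AND PROOFS =====

lemma fold1_eq (l : List Char) : ∀ (a b c : Int),
    l.foldl (fun (s : Int × Int × Int) c =>
      if c = 'L' then (s.1 + 1, s.2.1, s.2.2)
      else if c = 'M' then (s.1, s.2.1 + 1, s.2.2)
      else (s.1, s.2.1, s.2.2 + 1)) (a, b, c)
    = (a + l.count 'L', b + l.count 'M',
       c + (l.countP (fun x => !(x == 'L') && !(x == 'M'))) ) := by
  induction l with
  | nil => simp
  | cons hd tl ih =>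
    intro a b c
    by_cases h1 : hd = 'L' <;> by_cases h2 : hd = 'M' <;>
      simp_all <;> omega

lemma foldPair_eq (x y : Char) (h : x ≠ y) (l : List Char) : ∀ (a b : Int),
    l.foldl (fun (s : Int × Int) c =>
      if c = x then (s.1 + 1, s.2) else if c = y then (s.1, s.2 + 1) else s) (a, b)
    = (a + l.count x, b + l.count y) := by
  induction l with
  | nil => simp
  | cons hd tl ih =>
    intro a b
    by_cases h1 : hd = x <;> by_cases h2 : hd = y <;>
      simp_all <;> omega

-- the single-letter position list posLoop factors through
def posOf (ch : Char) : Nat → List Char → List Int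
  | _, [] => []
  | i, c :: rest => if c = ch then (i : Int) :: posOf ch (i + 1) rest else posOf ch (i + 1) rest

lemma posLoop_eq : ∀ (i : Nat) (xs : List Char),
    posLoop i xs = (posOf 'L' i xs, posOf 'M' i xs, posOf 'S' i xs) := by
  intro i xs
  induction xs generalizing i with
  | nil => simp [posLoop, posOf]
  | cons c rest ih =>
    by_cases h1 : c = 'L' <;> by_cases h2 : c = 'M' <;> by_cases h3 : c = 'S' <;>
      simp_all [posLoop, posOf]

lemma posOf_ge (ch : Char) : ∀ (i : Nat) (xs : List Char) (p : Int),
    p ∈ posOf ch i xs → (i : Int) ≤ p := by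
  intro i xs
  induction xs generalizing i with
  | nil => simp [posOf]
  | cons c rest ih =>
    intro p hp
    by_cases h : c = ch <;> simp_all [posOf]
    · rcases hp with h' | h'
      · omega
      · have := ih (i + 1) p h'; push_cast at this ⊢; omega
    · have := ih (i + 1) p hp; push_cast at this ⊢; omega

lemma posOf_sorted (ch : Char) : ∀ (i : Nat) (xs : List Char),
    (posOf ch i xs).Pairwise (· ≤ ·) := by
  intro i xs
  induction xs generalizing i with
  | nil => simp [posOf]
  | cons c rest ih =>
    by_cases h : c = ch <;> simp_all [posOf]
    intro p hp
    have := posOf_ge ch (i + 1) rest p hp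
    push_cast at this ⊢; omega

lemma posOf_length (ch : Char) : ∀ (i : Nat) (xs : List Char),
    (posOf ch i xs).length = xs.count ch := by
  intro i xs
  induction xs generalizing i with
  | nil => simp [posOf]
  | cons c rest ih =>
    by_cases h : c = ch <;> simp_all [posOf]

lemma posOf_countP (ch : Char) : ∀ (xs : List Char) (i b : Nat),
    (posOf ch i xs).countP (fun p => decide (p < (i : Int) + (b : Int)))
      = (xs.take b).count ch := by
  intro xs
  induction xs with
  | nil => simp [posOf]
  | cons c rest ih =>
    intro i b
    cases b with
    | zero =>
      simp only [List.take_zero, List.count_nil]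
      rw [List.countP_eq_zero]
      intro p hp
      by_cases h : c = ch <;> simp_all [posOf]
      · rcases hp with h' | h'
        · omega
        · have := posOf_ge ch (i + 1) rest p h'; omega
      · have := posOf_ge ch (i + 1) rest p hp; omega
    | succ n =>
      have key : (i : Int) + ((n + 1 : Nat) : Int) = ((i + 1 : Nat) : Int) + (n : Int) := by
        push_cast; ring
      by_cases h : c = ch
      · rw [show posOf ch i (c :: rest) = (i : Int) :: posOf ch (i + 1) rest from by
            simp [posOf, h],
          List.countP_cons, key, ih (i + 1) n, List.take_succ_cons, List.count_cons]
        simp [h]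
        omega
      · rw [show posOf ch i (c :: rest) = posOf ch (i + 1) rest from by simp [posOf, h],
          key, ih (i + 1) n, List.take_succ_cons, List.count_cons]
        simp [h]

-- on a sorted list the elements below x are exactly the first countP of them
lemma sorted_get_lt_iff (x : Int) : ∀ (a : List Int), a.Pairwise (· ≤ ·) →
    ∀ m, m < a.length →
      (a.getD m 0 < x ↔ m < a.countP (fun p => decide (p < x))) := by
  intro a
  induction a with
  | nil => simp
  | cons h t ih =>
    intro hs m hm
    have hst := (List.pairwise_cons.mp hs)
    cases m with
    | zero =>
      simp only [List.getD_cons_zero, List.countP_cons]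
      constructor
      · intro hx
        have hd : decide (h < x) = true := decide_eq_true hx
        simp [hd]
      · intro hc
        by_cases hx' : h < x
        · exact hx'
        · exfalso
          have ht0 : t.countP (fun p => decide (p < x)) = 0 := by
            rw [List.countP_eq_zero]
            intro p hp
            have := hst.1 p hp
            simp; omega
          simp [hx', ht0] at hc
    | succ n =>
      simp only [List.getD_cons_succ, List.countP_cons]
      rw [ih hst.2 n (by simpa using hm)]
      by_cases hx' : h < x
      · simp [hx']
      · have ht0 : t.countP (fun p => decide (p < x)) = 0 := by
          rw [List.countP_eq_zero]
          intro p hp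
          have := hst.1 p hp
          simp; omega
        simp [hx', ht0]

lemma belowAux_eq (a : List Int) (x : Int) (hs : a.Pairwise (· ≤ ·)) :
    ∀ (lo hi : Nat), hi ≤ a.length →
      lo ≤ a.countP (fun p => decide (p < x)) →
      a.countP (fun p => decide (p < x)) ≤ hi →
      belowAux a x lo hi = a.countP (fun p => decide (p < x)) := by
  intro lo hi
  induction lo, hi using belowAux.induct (a := a) (x := x) with
  | case1 lo hi hlt mid hmid ih =>
    intro hhi hlo hN
    have hmlt : (lo + hi) / 2 < a.countP (fun p => decide (p < x)) := by
      rw [← sorted_get_lt_iff x a hs ((lo + hi) / 2) (by omega)]; exact hmid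
    rw [belowAux]
    simp only [dif_pos hlt]
    rw [if_pos hmid]
    exact ih hhi (by omega) hN
  | case2 lo hi hlt mid hmid ih =>
    intro hhi hlo hN
    have hmge : ¬ (lo + hi) / 2 < a.countP (fun p => decide (p < x)) := by
      rw [← sorted_get_lt_iff x a hs ((lo + hi) / 2) (by omega)]; exact hmid
    rw [belowAux]
    simp only [dif_pos hlt]
    rw [if_neg hmid]
    exact ih (by omega) hlo (by omega)
  | case3 lo hi hlt =>
    intro hhi hlo hN
    rw [belowAux]
    simp only [dif_neg hlt]
    omega

lemma below_eq (a : List Int) (x : Int) (hs : a.Pairwise (· ≤ ·)) :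
    below a x = (a.countP (fun p => decide (p < x)) : Int) := by
  unfold below
  rw [belowAux_eq a x hs 0 a.length le_rfl (by omega) List.countP_le_length]

-- below on a position list counts the letter in the prefix (i = 0 instance of posOf_countP)
lemma below_posOf (ch : Char) (xs : List Char) (b : Nat) :
    below (posOf ch 0 xs) (b : Int) = ((xs.take b).count ch : Int) := by
  rw [below_eq _ _ (posOf_sorted ch 0 xs)]
  have := posOf_countP ch xs 0 b
  simp only [Nat.cast_zero, zero_add] at this
  rw [this]

-- ===== VERDICT (by name: the statement is the Claim_ definition above) =====
theorem solution_spec : Claim_equal_solution := by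
  intro booklist _
  unfold Spec_solution solution solution_alt
  simp only [fold1_eq, foldPair_eq 'M' 'S' (by decide), foldPair_eq 'L' 'S' (by decide),
    foldPair_eq 'L' 'M' (by decide), posLoop_eq, zero_add,
    PySem.List.slice_zero_start, PySem.List.slice_to_natCast, PySem.List.slice_natCast,
    ← Nat.cast_add, PySem.List.slice_from_natCast, posOf_length, below_posOf]
  set l := booklist.toList with hl
  set lt := l.count 'L' with hlt
  set mt := l.count 'M' with hmt
  have h1 : lt + mt - lt = mt := by omega
  rw [h1]
  have hsplit : ∀ ch : Char, (l.take (lt + mt)).count ch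
      = (l.take lt).count ch + ((l.drop lt).take mt).count ch := by
    intro ch; rw [List.take_add, List.count_append]
  have htot : ∀ ch : Char, l.count ch
      = (l.take (lt + mt)).count ch + (l.drop (lt + mt)).count ch := by
    intro ch; conv_lhs => rw [← List.take_append_drop (lt + mt) l]
    rw [List.count_append]
  have hb : ((l.take (lt + mt)).count 'L' : Int) - ((l.take lt).count 'L' : Int)
      = (((l.drop lt).take mt).count 'L' : Int) := by
    rw [hsplit 'L']; push_cast; ring
  have hd : (lt : Int) - ((l.take (lt + mt)).count 'L' : Int)
      = ((l.drop (lt + mt)).count 'L' : Int) := by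
    have := htot 'L'; rw [← hlt] at this; omega
  have he : ((l.take (lt + mt)).count 'S' : Int) - ((l.take lt).count 'S' : Int)
      = (((l.drop lt).take mt).count 'S' : Int) := by
    rw [hsplit 'S']; push_cast; ring
  have hf : (mt : Int) - ((l.take (lt + mt)).count 'M' : Int)
      = ((l.drop (lt + mt)).count 'M' : Int) := by
    have := htot 'M'; rw [← hmt] at this; omega
  rw [hb, hd, he, hf]
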